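-- pv_equiv track=rewrite | github.com/vanniagm/influentialthreads | App/blogpred_app/cleantags.py | freqtags
-- ===== SOURCE A (Python) =====
-- def freqtags(array_tags,topN):
--     freq_tags=[]
--     count=0
--     for tags in array_tags:
--         count=0
--         for tag in tags:
--             if tag in topN:
--                 count+=1
--         freq_tags.append(count)
--
--     return freq_tags
-- ===== SOURCE B (Python) =====
-- def freqtags(array_tags, topN):
--     targets = set(topN)
--     out = []
--     for tags in array_tags:
--         c = _counter(tags)
--         out.append(sum(c.get(t, 0) for t in targets))
--     return out
--
--
-- def _counter(tags):
--     c = {}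
--     for t in tags:
--         c[t] = c.get(t, 0) + 1
--     return c
-- ===== Notes on version B (the rewrite author's own statement) =====
-- stated objective: faster
-- what changed: Instead of scanning topN for every tag, B builds a hash frequency table per sublist once and sums the counts of the distinct target tags, removing the inner list scan.
import Mathlib
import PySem

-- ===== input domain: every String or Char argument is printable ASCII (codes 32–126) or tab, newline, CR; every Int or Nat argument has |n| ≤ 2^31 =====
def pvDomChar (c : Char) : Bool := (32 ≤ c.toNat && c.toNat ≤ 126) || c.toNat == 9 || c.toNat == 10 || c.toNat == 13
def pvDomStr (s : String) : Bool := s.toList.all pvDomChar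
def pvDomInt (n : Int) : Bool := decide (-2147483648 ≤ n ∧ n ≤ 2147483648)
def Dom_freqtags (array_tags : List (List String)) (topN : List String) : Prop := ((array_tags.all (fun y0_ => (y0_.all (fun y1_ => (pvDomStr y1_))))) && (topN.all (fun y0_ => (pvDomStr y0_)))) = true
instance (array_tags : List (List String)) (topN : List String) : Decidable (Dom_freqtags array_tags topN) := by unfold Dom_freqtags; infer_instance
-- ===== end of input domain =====

-- B replaces A's per-tag scan of topN by a per-list hash frequency table summed over the distinct target tags (faster: the inner list scan disappears).

-- ===== PORT A =====
def freqtags (array_tags : List (List String)) (topN : List String) : List Int :=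
  -- freq_tags=[]; count=0; for tags: count=0; for tag: if tag in topN: count+=1; append
  let st := array_tags.foldl
    (fun (st : List Int × Int) tags =>
      let count : Int := 0
      let count := tags.foldl (fun count tag => if topN.contains tag then count + 1 else count) count
      (st.1 ++ [count], count))
    ([], 0)
  st.1

-- ===== PORT B =====
def freqtags_alt (array_tags : List (List String)) (topN : List String) : List Int :=
  let targets := PySem.Set.ofList topN
  array_tags.map (fun tags =>
    let c := tags.foldl (fun d t => d.insert t (d.getD t 0 + 1)) PySem.Dict.empty
    targets.foldl (fun acc t => acc + c.getD t 0) 0)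

-- ===== PRECONDITION & SPEC =====
def Spec_freqtags (array_tags : List (List String)) (topN : List String) (out : List Int) : Prop := out = freqtags_alt array_tags topN
instance (array_tags : List (List String)) (topN : List String) (out : List Int) : Decidable (Spec_freqtags array_tags topN out) := by unfold Spec_freqtags; infer_instance

-- ===== CLAIM (what is proved, stated in full; the proofs are below) =====
def Claim_equal_freqtags : Prop := ∀ (array_tags : List (List String)) (topN : List String), Dom_freqtags array_tags topN → Spec_freqtags array_tags topN (freqtags array_tags topN)

-- ===== LEMMAS AND PROOFS =====

-- sum of the indicator of x over a duplicate-free list S is 1 or 0 according to membership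
theorem sum_indicator_nodup (S : List String) (hS : S.Nodup) (x : String) :
    (S.map (fun t => if x == t then (1 : Int) else 0)).sum = if S.contains x then 1 else 0 := by
  induction S with
  | nil => simp
  | cons s S ih =>
    rcases List.nodup_cons.mp hS with ⟨hs, hS'⟩
    rw [List.map_cons, List.sum_cons, ih hS']
    by_cases h : x = s
    · subst h
      simp [List.contains_eq_mem, hs]
    · simp only [List.contains_eq_mem, List.mem_cons]
      have hb : (x == s) = false := by simp [h]
      simp [hb, h]

-- summing tags.count over a duplicate-free list S counts the tags that lie in S
theorem sum_count_eq_countP (S : List String) (hS : S.Nodup) (tags : List String) :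
    (S.map (fun t => (tags.count t : Int))).sum = (tags.countP (fun x => S.contains x) : Int) := by
  induction tags with
  | nil => simp
  | cons x tags ih =>
    have hcnt : ∀ t : String, ((x :: tags).count t : Int)
        = (tags.count t : Int) + (if x == t then (1 : Int) else 0) := by
      intro t
      by_cases h : x = t
      · subst h; simp
      · simp [h]
    calc (S.map (fun t => ((x :: tags).count t : Int))).sum
        = (S.map (fun t => (tags.count t : Int) + (if x == t then (1 : Int) else 0))).sum := by
          simp only [hcnt]
      _ = (S.map (fun t => (tags.count t : Int))).sum
            + (S.map (fun t => if x == t then (1 : Int) else 0)).sum := by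
          rw [← List.sum_map_add]
      _ = (tags.countP (fun x => S.contains x) : Int) + (if S.contains x then 1 else 0) := by
          rw [ih, sum_indicator_nodup S hS x]
      _ = (((x :: tags).countP (fun x => S.contains x) : Int)) := by
          rw [List.countP_cons]
          by_cases h : S.contains x = true <;> simp

-- per-list value of B equals per-list value of A
theorem per_list_eq (topN tags : List String) :
    (PySem.Set.ofList topN).foldl
        (fun acc t => acc + (tags.foldl (fun d t => d.insert t (d.getD t 0 + 1)) PySem.Dict.empty).getD t 0) (0 : Int)
      = tags.foldl (fun count tag => if topN.contains tag then count + 1 else count) (0 : Int) := by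
  have hc : tags.foldl (fun (d : PySem.Dict String Int) t => d.insert t (d.getD t 0 + 1)) PySem.Dict.empty
      = PySem.Dict.counter tags := rfl
  rw [hc]
  have h1 : (PySem.Set.ofList topN).foldl
      (fun acc t => acc + (PySem.Dict.counter tags).getD t 0) 0
      = ((PySem.Set.ofList topN).map (fun t => (PySem.Dict.counter tags).getD t 0)).sum := by
    rw [PySem.List.foldl_add]; simp
  rw [h1]
  have h2 : (PySem.Set.ofList topN).map (fun t => (PySem.Dict.counter tags).getD t 0)
      = (PySem.Set.ofList topN).map (fun t => (tags.count t : Int)) := by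
    simp [PySem.Dict.getD_counter]
  rw [h2, sum_count_eq_countP _ (PySem.Set.nodup_ofList topN) tags,
    PySem.List.foldl_if_add_one]
  have h3 : tags.countP (fun x => List.contains (PySem.Set.ofList topN) x)
      = tags.countP (fun x => topN.contains x) := by
    apply List.countP_congr
    intro x _
    simp [List.contains_eq_mem, PySem.Set.mem_ofList]
  rw [h3]
  simp only [zero_add]

-- A's fold over a pair accumulator produces the appended list of per-list counts
theorem freqtags_foldl_eq (array_tags : List (List String)) (topN : List String)
    (acc : List Int) (c0 : Int) :
    (array_tags.foldl
      (fun (st : List Int × Int) tags =>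
        (st.1 ++ [tags.foldl (fun count tag => if topN.contains tag then count + 1 else count) 0],
          tags.foldl (fun count tag => if topN.contains tag then count + 1 else count) 0))
      (acc, c0)).1
    = acc ++ array_tags.map
        (fun tags => tags.foldl (fun count tag => if topN.contains tag then count + 1 else count) 0) := by
  induction array_tags generalizing acc c0 with
  | nil => simp
  | cons tags rest ih =>
    simp only [List.foldl_cons, List.map_cons]
    rw [ih]
    simp

-- ===== VERDICT (by name: the statement is the Claim_ definition above) =====
theorem freqtags_spec : Claim_equal_freqtags := by
  intro array_tags topN _
  unfold Spec_freqtags freqtags freqtags_alt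
  rw [freqtags_foldl_eq array_tags topN [] 0]
  simp only [List.nil_append]
  apply List.map_congr_left
  intro tags _
  exact (per_list_eq topN tags).symm
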